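-- pv_equiv track=rewrite | github.com/yolanda3212/camera-aware-re-implementation | tools/split_for_proxy.py | _add_proxies
-- ===== SOURCE A (Python) =====
-- def _add_proxies(sorted_samples):
--     '''
--     Core implementation of _get_same_cam_samples().
--     '''
--     label = 0
--     proxy_num = 0
--     for i in range(len(sorted_samples)):
--         if i == 0:
--             sorted_samples[i].append(0)
--             proxy_num += 1
--         elif sorted_samples[i][2] != sorted_samples[i-1][2]: # reach proxy boundary, add new label
--             label += 1
--             sorted_samples[i].append(label)
--             proxy_num += 1
--         else:
--             sorted_samples[i].append(label)
--     return sorted_samples, proxy_num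
-- ===== SOURCE B (Python) =====
-- def _add_proxies(sorted_samples):
--     if not sorted_samples:
--         return sorted_samples, 0
--     labels = [0]
--     for a, b in zip(sorted_samples, sorted_samples[1:]):
--         labels.append(labels[-1] + (1 if b[2] != a[2] else 0))
--     for s, l in zip(sorted_samples, labels):
--         s.append(l)
--     return sorted_samples, labels[-1] + 1
-- ===== Notes on version B (the rewrite author's own statement) =====
-- stated objective: alternative
-- what changed: A makes one indexed pass comparing each row's camera id to its predecessor's while mutating in place; B first builds the whole label list as a running prefix-sum over zipped adjacent-row pairs, then appends labels in a separate zip pass, taking proxy_num from the last label.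
-- outside the precondition, e.g. on _add_proxies([[5, 7], [1, 2, 9]]): A returns ([[5, 7, 0], [1, 2, 9, 1]], 2), B raises IndexError; on _add_proxies([[5, 7], [1, 2, 0]]): A returns ([[5, 7, 0], [1, 2, 0, 0]], 1), B raises IndexError
import Mathlib
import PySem

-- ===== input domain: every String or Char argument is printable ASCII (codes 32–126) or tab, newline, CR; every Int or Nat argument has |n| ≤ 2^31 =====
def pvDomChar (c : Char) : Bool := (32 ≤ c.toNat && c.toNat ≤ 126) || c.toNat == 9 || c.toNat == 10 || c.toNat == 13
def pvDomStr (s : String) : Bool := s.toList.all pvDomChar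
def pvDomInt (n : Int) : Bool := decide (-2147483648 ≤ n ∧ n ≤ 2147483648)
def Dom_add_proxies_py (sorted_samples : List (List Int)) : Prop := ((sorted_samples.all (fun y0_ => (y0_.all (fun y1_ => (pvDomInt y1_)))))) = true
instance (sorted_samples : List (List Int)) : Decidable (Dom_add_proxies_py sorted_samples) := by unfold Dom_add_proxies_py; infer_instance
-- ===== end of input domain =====

-- B replaces A's single indexed predecessor-comparison pass by a prefix-sum label list over
-- adjacent-row pairs followed by a separate append pass (objective: alternative decomposition).
-- A mutates its argument in place (rows get the label appended); the equivalence proved here is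
-- about the RETURN value only.

-- ===== PORT A =====
-- sorted_samples[i].append(v): in-place row mutation, ported as a functional update at index i
def pvAppendAt (l : List (List Int)) (i : Nat) (v : Int) : List (List Int) :=
  l.modify i (fun r => r ++ [v])

-- row[2]: pyGet? none = IndexError; the .getD default is unreachable under Pre_
def pvKey (r : List Int) : Int := (PySem.List.pyGet? r 2).getD 0

def add_proxies_py (sorted_samples : List (List Int)) : List (List Int) × Int :=
  let st := (PySem.List.pyRange 0 (sorted_samples.length : Int) 1).foldl
    (fun (st : List (List Int) × Int × Int) (i : Int) =>
      let samples := st.1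
      let label := st.2.1
      let proxy_num := st.2.2
      if i = 0 then
        (pvAppendAt samples i.toNat 0, label, proxy_num + 1)
      else if pvKey ((PySem.List.pyGet? samples i).getD []) ≠
              pvKey ((PySem.List.pyGet? samples (i - 1)).getD []) then
        (pvAppendAt samples i.toNat (label + 1), label + 1, proxy_num + 1)
      else
        (pvAppendAt samples i.toNat label, label, proxy_num))
    (sorted_samples, 0, 0)
  (st.1, st.2.2)

-- ===== PORT B =====
def add_proxies_py_alt (sorted_samples : List (List Int)) : List (List Int) × Int :=
  if sorted_samples.isEmpty then (sorted_samples, 0)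
  else
    -- zip(sorted_samples, sorted_samples[1:]); labels.append(labels[-1] + (1 if b[2] != a[2] else 0))
    let labels := (sorted_samples.zip (sorted_samples.drop 1)).foldl
      (fun acc ab =>
        acc ++ [acc.getLastD 0 + (if pvKey ab.2 ≠ pvKey ab.1 then 1 else 0)])
      [0]
    -- for s, l in zip(sorted_samples, labels): s.append(l)
    let out := (sorted_samples.zip labels).map (fun sl => sl.1 ++ [sl.2])
    (out, labels.getLastD 0 + 1)

-- ===== PRECONDITION & SPEC =====
-- Pre_ excludes lists of ≥ 2 rows containing a row shorter than 3: there A raises IndexError on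
-- row[2], except when only row 0 is short with exactly 2 fields, where A's returned comparison
-- accidentally reads its own freshly-appended label as the camera id (an artefact of the in-place
-- append) while B raises.
def Pre_add_proxies_py (sorted_samples : List (List Int)) : Prop :=
  sorted_samples.length ≤ 1 ∨ ∀ r ∈ sorted_samples, 3 ≤ r.length
instance (sorted_samples : List (List Int)) : Decidable (Pre_add_proxies_py sorted_samples) := by
  unfold Pre_add_proxies_py; infer_instance

def pvWitness_add_proxies_py : List (List Int) := [[1, 2, 3], [4, 5, 6], [7, 8, 6]]

def Spec_add_proxies_py (sorted_samples : List (List Int)) (out : List (List Int) × Int) : Prop := out = add_proxies_py_alt sorted_samples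
instance (sorted_samples : List (List Int)) (out : List (List Int) × Int) : Decidable (Spec_add_proxies_py sorted_samples out) := by unfold Spec_add_proxies_py; infer_instance

-- ===== CLAIM (what is proved, stated in full; the proofs are below) =====
def Claim_equal_add_proxies_py : Prop := ∀ (sorted_samples : List (List Int)), Dom_add_proxies_py sorted_samples → Pre_add_proxies_py sorted_samples → Spec_add_proxies_py sorted_samples (add_proxies_py sorted_samples)

-- ===== LEMMAS AND PROOFS =====

-- camera key of row j of the original list
def pvKf (xs : List (List Int)) (j : Nat) : Int := pvKey (xs.getD j [])

-- A's/B's running label after row j (number of boundaries among rows 1..j)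
def pvL (xs : List (List Int)) : Nat → Int
  | 0 => 0
  | j + 1 => pvL xs j + (if pvKf xs (j + 1) ≠ pvKf xs j then 1 else 0)

-- A's sample list after the first k rows have been labelled
def pvSamp (xs : List (List Int)) (k : Nat) : List (List Int) :=
  (List.range xs.length).map (fun j => if j < k then xs.getD j [] ++ [pvL xs j] else xs.getD j [])

theorem pvSamp_zero (xs : List (List Int)) : pvSamp xs 0 = xs := by
  apply List.ext_getElem
  · simp [pvSamp]
  · intro j h1 h2
    simp [pvSamp, List.getElem?_eq_getElem h2]

theorem pvSamp_length (xs : List (List Int)) (k : Nat) : (pvSamp xs k).length = xs.length := by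
  simp [pvSamp]

theorem pvSamp_getElem (xs : List (List Int)) (k j : Nat) (hj : j < xs.length) :
    (pvSamp xs k)[j]'(by simpa [pvSamp_length]) =
      if j < k then xs.getD j [] ++ [pvL xs j] else xs.getD j [] := by
  simp [pvSamp]

theorem pvSamp_succ (xs : List (List Int)) (k : Nat) (_hk : k < xs.length) :
    pvAppendAt (pvSamp xs k) k (pvL xs k) = pvSamp xs (k + 1) := by
  apply List.ext_getElem
  · simp [pvAppendAt, pvSamp_length]
  · intro j h1 h2
    have hj : j < xs.length := by simpa [pvAppendAt, pvSamp_length] using h1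
    simp only [pvAppendAt]
    rw [List.getElem_modify]
    rcases eq_or_ne k j with rfl | hne
    · simp [pvSamp_getElem _ _ _ hj]
    · rw [if_neg hne, pvSamp_getElem _ _ _ hj, pvSamp_getElem _ _ _ hj]
      by_cases h : j < k
      · simp [h, Nat.lt_succ_of_lt h]
      · have : ¬ j < k + 1 := by omega
        simp [h, this]

theorem pvKey_append (r : List Int) (h : 3 ≤ r.length) (x : Int) :
    pvKey (r ++ [x]) = pvKey r := by
  unfold pvKey
  rw [show ((2 : Int) = ((2 : Nat) : Int)) from rfl, PySem.List.pyGet?_natCast,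
    PySem.List.pyGet?_natCast, List.getElem?_append_left (by omega)]

-- the fold step of port A
def pvStep (st : List (List Int) × Int × Int) (i : Int) : List (List Int) × Int × Int :=
  if i = 0 then
    (pvAppendAt st.1 i.toNat 0, st.2.1, st.2.2 + 1)
  else if pvKey ((PySem.List.pyGet? st.1 i).getD []) ≠
          pvKey ((PySem.List.pyGet? st.1 (i - 1)).getD []) then
    (pvAppendAt st.1 i.toNat (st.2.1 + 1), st.2.1 + 1, st.2.2 + 1)
  else
    (pvAppendAt st.1 i.toNat st.2.1, st.2.1, st.2.2)

theorem pvA_eq_foldl (xs : List (List Int)) :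
    add_proxies_py xs =
      (((PySem.List.pyRange 0 (xs.length : Int) 1).foldl pvStep (xs, 0, 0)).1,
       ((PySem.List.pyRange 0 (xs.length : Int) 1).foldl pvStep (xs, 0, 0)).2.2) := rfl

-- invariant of A's loop over range(len(xs)), for lists whose rows all have length ≥ 3
theorem pvA_inv (xs : List (List Int)) (h3 : ∀ r ∈ xs, 3 ≤ r.length) (k : Nat)
    (hk1 : 1 ≤ k) (hk : k ≤ xs.length) :
    (PySem.List.pyRange 0 (k : Int) 1).foldl pvStep (xs, 0, 0) =
      (pvSamp xs k, pvL xs (k - 1), pvL xs (k - 1) + 1) := by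
  induction k with
  | zero => omega
  | succ k ih =>
    rcases Nat.eq_or_lt_of_le hk1 with h1 | h1
    · -- k + 1 = 1 : first iteration, index 0
      have hk0 : k = 0 := by omega
      subst hk0
      rw [show ((1 : Nat) : Int) = (0 : Int) + 1 from rfl,
        PySem.List.pyRange_one_singleton]
      simp only [List.foldl_cons, List.foldl_nil, pvStep, if_pos]
      have h0 : 0 < xs.length := by omega
      rw [show (pvAppendAt xs (Int.toNat 0) 0 = pvAppendAt (pvSamp xs 0) 0 (pvL xs 0)) from by
        simp [pvSamp_zero, pvL], pvSamp_succ xs 0 h0]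
      simp [pvL]
    · -- k ≥ 1 : peel the last index k
      obtain ⟨m, rfl⟩ : ∃ m, k = m + 1 := ⟨k - 1, by omega⟩
      have hk' : m + 1 ≤ xs.length := by omega
      have hklt : m + 1 < xs.length := by omega
      rw [show ((m + 1 + 1 : Nat) : Int) = ((m + 1 : Nat) : Int) + 1 by push_cast; ring,
        PySem.List.pyRange_one_succ_right (by positivity), List.foldl_append,
        ih (by omega) hk']
      simp only [List.foldl_cons, List.foldl_nil]
      -- evaluate the step at index m + 1
      have hkne : (((m + 1 : Nat) : Int)) ≠ 0 := by omega
      have hget_k : (PySem.List.pyGet? (pvSamp xs (m + 1)) ((m + 1 : Nat) : Int)).getD []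
          = xs.getD (m + 1) [] := by
        rw [PySem.List.pyGet?_natCast, List.getElem?_eq_getElem (by simpa [pvSamp_length]),
          pvSamp_getElem _ _ _ hklt]
        simp
      have hget_km : (PySem.List.pyGet? (pvSamp xs (m + 1)) (((m + 1 : Nat) : Int) - 1)).getD []
          = xs.getD m [] ++ [pvL xs m] := by
        rw [show (((m + 1 : Nat) : Int) - 1) = ((m : Nat) : Int) by push_cast; ring,
          PySem.List.pyGet?_natCast,
          List.getElem?_eq_getElem (by simp [pvSamp_length]; omega),
          pvSamp_getElem _ _ _ (by omega)]
        simp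
      have hmem : xs.getD m [] ∈ xs := by
        rw [List.getD_eq_getElem xs [] (show m < xs.length by omega)]
        exact List.getElem_mem _
      have hkey_km : pvKey (xs.getD m [] ++ [pvL xs m]) = pvKf xs m := by
        rw [pvKey_append _ (h3 _ hmem)]
        rfl
      rw [pvStep, if_neg hkne, hget_k, hget_km, hkey_km]
      have hkk : pvKey (xs.getD (m + 1) []) = pvKf xs (m + 1) := rfl
      rw [hkk]
      simp only [Nat.add_sub_cancel]
      by_cases hb : pvKf xs (m + 1) ≠ pvKf xs m
      · rw [if_pos hb]
        have hL : pvL xs m + 1 = pvL xs (m + 1) := by rw [pvL, if_pos hb]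
        rw [show (Int.toNat ((m + 1 : Nat) : Int)) = m + 1 by omega, hL, pvSamp_succ xs (m + 1) hklt]
      · rw [if_neg hb]
        have hL : pvL xs m = pvL xs (m + 1) := by rw [pvL, if_neg hb]; ring
        rw [show (Int.toNat ((m + 1 : Nat) : Int)) = m + 1 by omega, hL, pvSamp_succ xs (m + 1) hklt]

-- scanFrom x ds : running prefix sums starting at x (the shape B's labels list takes)
def pvScan (x : Int) : List Int → List Int
  | [] => [x]
  | d :: ds => x :: pvScan (x + d) ds

theorem pvFoldl_scan (ds : List Int) (init : List Int) (x : Int) :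
    ds.foldl (fun acc d => acc ++ [acc.getLastD 0 + d]) (init ++ [x]) = init ++ pvScan x ds := by
  induction ds generalizing init x with
  | nil => simp [pvScan]
  | cons d ds ih =>
    simp only [List.foldl_cons, List.getLastD_concat, pvScan]
    rw [show (init ++ [x] ++ [x + d]) = (init ++ [x]) ++ [x + d] by simp,
      ih (init ++ [x]) (x + d)]
    simp

theorem pvScan_eq_map (ds : List Int) (x : Int) :
    pvScan x ds = (List.range (ds.length + 1)).map (fun j => x + (ds.take j).sum) := by
  induction ds generalizing x with
  | nil => simp [pvScan]
  | cons d ds ih =>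
    rw [pvScan, ih (x + d)]
    conv_rhs => rw [show (d :: ds).length + 1 = (ds.length + 1) + 1 by simp,
      List.range_succ_eq_map]
    simp only [List.map_cons, List.map_map, List.take_zero, List.sum_nil, add_zero]
    congr 1
    apply List.map_congr_left
    intro j hj
    simp [List.take_succ_cons, add_assoc]

-- the delta list B folds over
def pvDelta (xs : List (List Int)) : List Int :=
  (xs.zip (xs.drop 1)).map (fun ab => if pvKey ab.2 ≠ pvKey ab.1 then 1 else 0)

theorem pvDelta_length (xs : List (List Int)) (_h : 1 ≤ xs.length) :
    (pvDelta xs).length = xs.length - 1 := by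
  simp [pvDelta]

theorem pvDelta_getElem (xs : List (List Int)) (j : Nat) (hj : j + 1 < xs.length) :
    (pvDelta xs)[j]'(by rw [pvDelta_length xs (by omega)]; omega) =
      if pvKf xs (j + 1) ≠ pvKf xs j then 1 else 0 := by
  simp only [pvDelta, List.getElem_map, List.getElem_zip, List.getElem_drop]
  have e1 : xs[1 + j]'(by omega) = xs.getD (j + 1) [] := by
    rw [List.getD_eq_getElem xs [] (show j + 1 < xs.length by omega)]
    congr 1
    omega
  have e2 : xs[j]'(by omega) = xs.getD j [] := by
    rw [List.getD_eq_getElem xs [] (show j < xs.length by omega)]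
  rw [e1, e2]
  rfl

theorem pvL_eq_sum (xs : List (List Int)) (j : Nat) (hj : j < xs.length) :
    pvL xs j = ((pvDelta xs).take j).sum := by
  induction j with
  | zero => simp [pvL]
  | succ j ih =>
    have hjd : j < (pvDelta xs).length := by rw [pvDelta_length xs (by omega)]; omega
    rw [pvL, ih (by omega), List.take_add_one, List.getElem?_eq_getElem hjd]
    simp only [List.sum_append, pvDelta_getElem xs j (by omega)]
    simp

-- B's labels list equals the map of pvL
theorem pvLabels_eq (xs : List (List Int)) (h : 1 ≤ xs.length) :
    (xs.zip (xs.drop 1)).foldl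
        (fun acc ab => acc ++ [acc.getLastD 0 + (if pvKey ab.2 ≠ pvKey ab.1 then 1 else 0)]) [0]
      = (List.range xs.length).map (pvL xs) := by
  have hfold : (xs.zip (xs.drop 1)).foldl
      (fun acc ab => acc ++ [acc.getLastD 0 + (if pvKey ab.2 ≠ pvKey ab.1 then 1 else 0)]) [0]
      = (pvDelta xs).foldl (fun acc d => acc ++ [acc.getLastD 0 + d]) [0] := by
    rw [pvDelta, List.foldl_map]
  rw [hfold, show ([0] : List Int) = [] ++ [0] by simp, pvFoldl_scan, List.nil_append,
    pvScan_eq_map, pvDelta_length xs h, Nat.sub_add_cancel h]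
  apply List.map_congr_left
  intro j hj
  rw [zero_add, ← pvL_eq_sum xs j (by simpa using hj)]

-- ===== VERDICT (by name: the statement is the Claim_ definition above) =====
theorem add_proxies_py_spec : Claim_equal_add_proxies_py := by
  intro xs _ hpre
  unfold Spec_add_proxies_py
  rcases Nat.eq_zero_or_pos xs.length with h0 | hpos
  · -- empty list
    have : xs = [] := List.length_eq_zero_iff.mp h0
    subst this
    simp [add_proxies_py, add_proxies_py_alt, PySem.List.pyRange]
  rcases hpre with hle | h3
  · -- single row, any length
    have hone : PySem.List.pyRange 0 (1 : Int) 1 = [0] := by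
      simpa using PySem.List.pyRange_one_singleton (a := (0 : Int))
    cases xs with
    | nil => simp at hpos
    | cons r t =>
      cases t with
      | nil =>
        simp [add_proxies_py, add_proxies_py_alt, hone, pvAppendAt]
      | cons b t2 => simp at hle
  · -- general case: all rows have length ≥ 3
    have n1 : 1 ≤ xs.length := hpos
    have hxne : ¬ xs.isEmpty := by simp [List.isEmpty_iff]; intro h; subst h; simp at hpos
    have hA := pvA_inv xs h3 xs.length n1 le_rfl
    rw [pvA_eq_foldl, hA]
    unfold add_proxies_py_alt
    rw [if_neg hxne]
    simp only
    rw [pvLabels_eq xs n1]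
    have hlab_last : ((List.range xs.length).map (pvL xs)).getLastD 0 = pvL xs (xs.length - 1) := by
      obtain ⟨m, hm⟩ : ∃ m, xs.length = m + 1 := ⟨xs.length - 1, by omega⟩
      rw [hm, List.range_succ, List.map_append]
      simp
    rw [hlab_last]
    have hout : (xs.zip ((List.range xs.length).map (pvL xs))).map (fun sl => sl.1 ++ [sl.2])
        = pvSamp xs xs.length := by
      apply List.ext_getElem
      · simp [pvSamp_length]
      · intro j h1 h2
        have hj : j < xs.length := by simpa [pvSamp_length] using h2
        rw [pvSamp_getElem _ _ _ hj, if_pos hj]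
        simp [List.getElem?_eq_getElem hj]
    rw [hout]
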